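-- pv_equiv track=rewrite | github.com/Akshayanti/cross-lingual-tagging | align.py | remove_ambiguity
-- ===== SOURCE A (Python) =====
-- def remove_ambiguity(token, dict_with_pos):
-- 	max = 0
-- 	count = 0
-- 	vals = []
-- 	for values in dict_with_pos[token]:
-- 		if dict_with_pos[token][values] > max:
-- 			count = 1
-- 			vals = [values]
-- 			max = dict_with_pos[token][values]
-- 		elif dict_with_pos[token][values] == max:
-- 			count += 1
-- 			vals.append(values)
-- 	if count > 1:
-- 		return False, vals
-- 	else:
-- 		return True, vals
-- ===== SOURCE B (Python) =====
-- def remove_ambiguity(token, dict_with_pos):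
--     inner = dict_with_pos[token]
--     m = max([0] + list(inner.values()))
--     vals = [k for k in inner if inner[k] == m]
--     return len(vals) <= 1, vals
-- ===== Notes on version B (the rewrite author's own statement) =====
-- stated objective: simpler
-- what changed: A's fused single loop that tracks a running max, a counter and a rebuilt candidate list is replaced by two separate passes: compute the effective maximum m = max([0]+values), then filter the keys whose value equals m; ambiguity is just len(vals) <= 1.
import Mathlib
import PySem

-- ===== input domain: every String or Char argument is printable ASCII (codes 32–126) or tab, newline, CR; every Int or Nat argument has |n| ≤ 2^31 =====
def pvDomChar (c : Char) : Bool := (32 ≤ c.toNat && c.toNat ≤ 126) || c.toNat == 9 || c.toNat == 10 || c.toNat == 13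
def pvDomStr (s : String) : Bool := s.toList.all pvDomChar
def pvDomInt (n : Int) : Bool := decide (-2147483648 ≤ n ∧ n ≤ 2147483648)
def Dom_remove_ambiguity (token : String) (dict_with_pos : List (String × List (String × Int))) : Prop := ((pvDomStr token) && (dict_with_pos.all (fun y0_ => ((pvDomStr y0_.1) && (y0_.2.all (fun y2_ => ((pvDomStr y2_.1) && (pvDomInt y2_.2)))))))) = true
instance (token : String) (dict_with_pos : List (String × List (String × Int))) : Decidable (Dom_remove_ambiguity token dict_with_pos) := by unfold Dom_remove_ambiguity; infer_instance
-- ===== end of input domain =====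

-- B replaces A's fused max-tracking loop by two separate passes (max with floor 0, then filter); objective: simpler.


-- ===== PORT A =====
-- for values in dict_with_pos[token]: track running max / count / vals; dict lookup = first match in the assoc list
def remove_ambiguity (token : String) (dict_with_pos : List (String × List (String × Int))) : Bool × List String :=
  let inner := (List.lookup token dict_with_pos).getD []   -- dict_with_pos[token]; Pre_ excludes the KeyError case
  let st := inner.foldl (fun (s : Int × Int × List String) kv =>
      let v := (List.lookup kv.1 inner).getD 0             -- dict_with_pos[token][values]
      if v > s.1 then (v, 1, [kv.1])
      else if v = s.1 then (s.1, s.2.1 + 1, s.2.2 ++ [kv.1])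
      else s) ((0 : Int), (0 : Int), ([] : List String))
  if st.2.1 > 1 then (false, st.2.2) else (true, st.2.2)

-- ===== PORT B =====
-- m = max([0] + list(inner.values())): for Int values, the left fold of max over 0 :: values is exact
def remove_ambiguity_alt (token : String) (dict_with_pos : List (String × List (String × Int))) : Bool × List String :=
  let inner := (List.lookup token dict_with_pos).getD []
  let m := (inner.map Prod.snd).foldl max (0 : Int)
  let vals := (inner.map Prod.fst).filter (fun k => (List.lookup k inner).getD 0 == m)
  (decide (vals.length ≤ 1), vals)

-- ===== PRECONDITION & SPEC =====
-- Pre_ excludes (a) a token absent from the dict, where Python A raises KeyError, and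
-- (b) inner assoc lists with duplicate keys, which cannot arise from a Python dict.
def Pre_remove_ambiguity (token : String) (dict_with_pos : List (String × List (String × Int))) : Prop :=
  (List.lookup token dict_with_pos).isSome ∧
  (((List.lookup token dict_with_pos).getD []).map Prod.fst).Nodup
instance (token : String) (dict_with_pos : List (String × List (String × Int))) : Decidable (Pre_remove_ambiguity token dict_with_pos) := by unfold Pre_remove_ambiguity; infer_instance

def pvWitness_remove_ambiguity : String × (List (String × List (String × Int))) :=
  ("dog", [("dog", [("NOUN", 2), ("VERB", 2)])])

def Spec_remove_ambiguity (token : String) (dict_with_pos : List (String × List (String × Int))) (out : Bool × List String) : Prop := out = remove_ambiguity_alt token dict_with_pos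
instance (token : String) (dict_with_pos : List (String × List (String × Int))) (out : Bool × List String) : Decidable (Spec_remove_ambiguity token dict_with_pos out) := by unfold Spec_remove_ambiguity; infer_instance

-- ===== CLAIM (what is proved, stated in full; the proofs are below) =====
def Claim_equal_remove_ambiguity : Prop := ∀ (token : String) (dict_with_pos : List (String × List (String × Int))), Dom_remove_ambiguity token dict_with_pos → Pre_remove_ambiguity token dict_with_pos → Spec_remove_ambiguity token dict_with_pos (remove_ambiguity token dict_with_pos)

-- ===== LEMMAS AND PROOFS =====

-- with Nodup keys, looking a member's key up returns its own value
lemma lookup_of_mem_nodup {l : List (String × Int)} (hnd : (l.map Prod.fst).Nodup)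
    {kv : String × Int} (h : kv ∈ l) : List.lookup kv.1 l = some kv.2 := by
  induction l with
  | nil => cases h
  | cons p rest ih =>
    simp only [List.map_cons, List.nodup_cons] at hnd
    rw [List.mem_cons] at h
    rcases h with h | h
    · subst h; simp [List.lookup]
    · have hne : (kv.1 == p.1) = false :=
        beq_eq_false_iff_ne.mpr (fun he => hnd.1 (he ▸ List.mem_map_of_mem h))
      simp only [List.lookup, hne]
      exact ih hnd.2 h

-- characterisation of A's fold: state = (running max with floor 0, count, keys achieving it)
lemma foldA_char (l : List (String × Int)) :
    l.foldl (fun (s : Int × Int × List String) kv =>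
      if kv.2 > s.1 then (kv.2, 1, [kv.1])
      else if kv.2 = s.1 then (s.1, s.2.1 + 1, s.2.2 ++ [kv.1])
      else s) ((0 : Int), (0 : Int), ([] : List String))
    = ((l.map Prod.snd).foldl max 0,
       ((l.filter (fun kv => kv.2 == (l.map Prod.snd).foldl max 0)).length : Int),
       (l.filter (fun kv => kv.2 == (l.map Prod.snd).foldl max 0)).map Prod.fst) := by
  induction l using List.reverseRecOn with
  | nil => simp
  | append_singleton l x ih =>
    rw [List.foldl_append, ih]
    simp only [List.map_append, List.map_cons, List.map_nil, List.foldl_append,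
      List.foldl_cons, List.foldl_nil, List.filter_append]
    have hle := (PySem.List.le_foldl_max (a := (0:Int)) (l.map Prod.snd)).2
    have hM0 := (PySem.List.le_foldl_max (a := (0:Int)) (l.map Prod.snd)).1
    generalize hMd : (l.map Prod.snd).foldl max 0 = M at hle hM0 ih ⊢
    by_cases hgt : x.2 > M
    · have hmax : max M x.2 = x.2 := max_eq_right (le_of_lt hgt)
      simp only [hmax]
      simp [hgt]
      intro a b hab hb
      have := hle b (List.mem_map_of_mem hab)
      omega
    · by_cases heq : x.2 = M
      · have hmax : max M x.2 = M := max_eq_left heq.le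
        simp [heq]
      · have hmax : max M x.2 = M := max_eq_left (by omega)
        rw [hmax, if_neg (by omega)]
        simp [heq]

-- ===== VERDICT (by name: the statement is the Claim_ definition above) =====
theorem remove_ambiguity_spec : Claim_equal_remove_ambiguity := by
  intro token d _ hpre
  unfold Spec_remove_ambiguity remove_ambiguity remove_ambiguity_alt
  dsimp only
  obtain ⟨_, hnd⟩ := hpre
  set inner := (List.lookup token d).getD [] with hinner
  -- replace the in-loop lookup by the pair's own value
  have hfold :
      inner.foldl (fun (s : Int × Int × List String) kv =>
        let v := (List.lookup kv.1 inner).getD 0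
        if v > s.1 then (v, 1, [kv.1])
        else if v = s.1 then (s.1, s.2.1 + 1, s.2.2 ++ [kv.1])
        else s) ((0 : Int), (0 : Int), ([] : List String))
      = inner.foldl (fun (s : Int × Int × List String) kv =>
        if kv.2 > s.1 then (kv.2, 1, [kv.1])
        else if kv.2 = s.1 then (s.1, s.2.1 + 1, s.2.2 ++ [kv.1])
        else s) ((0 : Int), (0 : Int), ([] : List String)) := by
    apply PySem.List.foldl_congr_mem
    intro s kv hkv
    rw [lookup_of_mem_nodup hnd hkv]
    rfl
  rw [hfold, foldA_char]
  set M := (inner.map Prod.snd).foldl max 0 with hMdef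
  -- B's filter over keys equals the map-of-filter over pairs
  have hvals : (inner.map Prod.fst).filter (fun k => (List.lookup k inner).getD 0 == M)
      = (inner.filter (fun kv => kv.2 == M)).map Prod.fst := by
    rw [List.filter_map]
    congr 1
    apply List.filter_congr
    intro kv hkv
    rw [Function.comp_apply, lookup_of_mem_nodup hnd hkv]
    rfl
  rw [hvals]
  simp only []
  set L := (inner.filter (fun kv => kv.2 == M)).map Prod.fst with hL
  have hlen : L.length = (inner.filter (fun kv => kv.2 == M)).length := by
    simp [hL]
  by_cases h1 : ((inner.filter (fun kv => kv.2 == M)).length : Int) > 1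
  · rw [if_pos h1]
    have : ¬ L.length ≤ 1 := by omega
    simp [this]
  · rw [if_neg h1]
    have : L.length ≤ 1 := by omega
    simp [this]
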